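-- pv_equiv track=rewrite | github.com/uw-math-ai/arXiTeX | arXiTeX/lib/statement/remove_comments.py | remove_line_comments
-- ===== SOURCE A (Python) =====
-- def remove_line_comments(line: str) -> str:
--     """
--     Remove LaTeX comments from a single line, preserving escaped percent signs.
--
--     Parameters
--     ----------
--     line: str
--         A line of valid LaTeX
--
--     Returns
--     -------
--     clean_line: str
--         `line` without line comments or leading and trailing whitespace
--     """
--     i = 0
--     while i < len(line):
--         if line[i] == "%":
--             if i == 0 or line[i - 1] != "\\":
--                 return line[:i].strip()
--         i += 1
--
--     return line.strip()
-- ===== SOURCE B (Python) =====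
-- def remove_line_comments(line: str) -> str:
--     parts = line.split('%')
--     keep = parts[0]
--     for part in parts[1:]:
--         if not keep.endswith('\\'):
--             break
--         keep = keep + '%' + part
--     return keep.strip()
-- ===== Notes on version B (the rewrite author's own statement) =====
-- stated objective: alternative
-- what changed: B replaces A's per-character index scan with a split/rejoin pipeline: it splits the line on '%' and folds over the pieces, re-attaching each piece whose accumulated predecessor ends with a backslash and stripping the accumulated prefix at the first piece that does not.
import Mathlib
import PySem

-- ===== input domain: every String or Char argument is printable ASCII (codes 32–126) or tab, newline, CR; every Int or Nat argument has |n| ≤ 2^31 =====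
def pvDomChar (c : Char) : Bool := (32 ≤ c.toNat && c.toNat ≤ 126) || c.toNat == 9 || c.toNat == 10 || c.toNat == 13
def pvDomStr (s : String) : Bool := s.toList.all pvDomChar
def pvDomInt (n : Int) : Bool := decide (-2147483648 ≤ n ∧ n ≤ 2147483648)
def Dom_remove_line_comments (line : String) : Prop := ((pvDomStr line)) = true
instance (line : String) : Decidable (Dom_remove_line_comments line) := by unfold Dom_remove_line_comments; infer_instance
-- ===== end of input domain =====

-- B splits the line into '%'-separated pieces and rejoins the pieces whose
-- predecessor ends with a backslash, instead of A's per-character index loop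
-- (objective: alternative decomposition; same asymptotic cost).

-- ===== PORT A =====
-- A's while-loop over index i; line[i] / line[i-1] are always in range when read.
def removeGoA (line : String) (cs : List Char) (i : Nat) : String :=
  if i < cs.length then
    if cs.getD i ' ' = '%' then
      if i = 0 ∨ cs.getD (i - 1) ' ' ≠ '\\' then
        PySem.Str.strip (String.ofList (PySem.List.slice cs none (some (i : Int))))
      else removeGoA line cs (i + 1)
    else removeGoA line cs (i + 1)
  else PySem.Str.strip line
termination_by cs.length - i

def remove_line_comments (line : String) : String :=
  removeGoA line line.toList 0

-- ===== PORT B =====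
-- loop of B: for part in parts[1:]: break unless keep ends with '\\', else rejoin
def goB : List Char → List (List Char) → List Char
  | keep, [] => PySem.Chars.strip keep
  | keep, p :: rest =>
    if PySem.Chars.endswith keep ['\\'] then goB (keep ++ '%' :: p) rest
    else PySem.Chars.strip keep

-- line.split('%') ported as List.splitOn on the characters (exact for a 1-char sep)
def remove_line_comments_alt (line : String) : String :=
  let parts := line.toList.splitOn '%'
  String.ofList (goB (parts.headD []) parts.tail)

-- ===== PRECONDITION & SPEC =====
def Spec_remove_line_comments (line : String) (out : String) : Prop := out = remove_line_comments_alt line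
instance (line : String) (out : String) : Decidable (Spec_remove_line_comments line out) := by unfold Spec_remove_line_comments; infer_instance

-- ===== CLAIM (what is proved, stated in full; the proofs are below) =====
def Claim_equal_remove_line_comments : Prop := ∀ (line : String), Dom_remove_line_comments line → Spec_remove_line_comments line (remove_line_comments line)

-- ===== LEMMAS AND PROOFS =====

lemma endswith_take (cs : List Char) (i : Nat) (hi : i < cs.length) :
    PySem.Chars.endswith (cs.take i) ['\\'] = true ↔
      ¬ (i = 0 ∨ cs.getD (i - 1) ' ' ≠ '\\') := by
  rw [PySem.Chars.endswith_iff]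
  cases i with
  | zero => simp
  | succ j =>
    have hj : j < cs.length := by omega
    have hgd : cs.getD (j + 1 - 1) ' ' = cs[j] := by
      simp [List.getD, List.getElem?_eq_getElem hj]
    rw [← List.take_concat_get' cs j hj, hgd]
    constructor
    · rintro ⟨t, ht⟩
      have hlast := congrArg List.getLast? ht
      rw [List.getLast?_concat, List.getLast?_concat] at hlast
      rintro (h0 | hne)
      · omega
      · exact hne (Option.some.inj hlast).symm
    · intro h
      rw [not_or, not_not] at h
      exact ⟨cs.take j, by rw [h.2]⟩

lemma mk_strip_toList (s : String) :
    PySem.Str.strip s = String.ofList (PySem.Chars.strip s.toList) := by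
  rw [← String.toList_inj]
  simp [String.toList_ofList]

-- the combined invariant: A at index i equals B on the split of the rest of cs,
-- with cs.take i already accumulated in keep
lemma main_eq (line : String) (cs : List Char) (i : Nat) (hcs : cs = line.toList) :
    removeGoA line cs i =
      String.ofList (goB (cs.take i ++ ((cs.drop i).splitOn '%').headD [])
                     ((cs.drop i).splitOn '%').tail) := by
  by_cases h : i < cs.length
  · have hd : cs.drop i = cs.getD i ' ' :: cs.drop (i + 1) := by
      rw [List.getD_eq_getElem cs ' ' h]
      exact (List.drop_eq_getElem_cons h)
    rw [removeGoA]
    simp only [h, if_true]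
    by_cases hc : cs.getD i ' ' = '%'
    · -- current char is '%': splitOn produces an empty head piece
      obtain ⟨q, qs, hq⟩ := List.exists_cons_of_ne_nil
        (List.splitOnP_ne_nil (· == '%') (cs.drop (i + 1)))
      have hq' : (cs.drop (i + 1)).splitOn '%' = q :: qs := hq
      have hsplit : (cs.drop i).splitOn '%' = [] :: q :: qs := by
        rw [hd, hc, List.splitOn, List.splitOnP_cons]
        simp only [BEq.rfl, if_true]
        rw [show (cs.drop (i+1)).splitOnP (· == '%') = q :: qs from hq]
      rw [hsplit]
      simp only [List.headD, List.tail, List.append_nil]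
      by_cases he : i = 0 ∨ cs.getD (i - 1) ' ' ≠ '\\'
      · -- unescaped: A cuts; B's endswith test fails and it strips keep
        have hb : ¬ (PySem.Chars.endswith (cs.take i) ['\\'] = true) := by
          rw [endswith_take cs i h]; exact fun hx => hx he
        rw [if_pos hc, if_pos he]
        simp only [goB]
        rw [if_neg hb]
        rw [PySem.List.slice_to_natCast, mk_strip_toList]
        congr 1
        simp
      · -- escaped: both continue, keep grows by '%'
        have hb : PySem.Chars.endswith (cs.take i) ['\\'] = true := by
          rw [endswith_take cs i h]; exact he
        simp only [hc, he, if_true, if_false]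
        simp only [goB]
        rw [if_pos hb]
        have hci : cs[i] = '%' := by rw [← List.getD_eq_getElem cs ' ' h]; exact hc
        have htk : cs.take i ++ '%' :: q = cs.take (i + 1) ++ q := by
          rw [← List.take_concat_get' cs i h, List.append_assoc, List.singleton_append, hci]
        rw [htk]
        have ih := main_eq line cs (i + 1) hcs
        rw [ih, hq']
        simp only [List.headD, List.tail]
    · -- ordinary char: splitOn conses it onto the head piece
      obtain ⟨q, qs, hq⟩ := List.exists_cons_of_ne_nil
        (List.splitOnP_ne_nil (· == '%') (cs.drop (i + 1)))
      have hsplit : (cs.drop i).splitOn '%' = (cs.getD i ' ' :: q) :: qs := by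
        rw [hd, List.splitOn, List.splitOnP_cons]
        simp only [beq_iff_eq, hc, if_false]
        rw [show (cs.drop (i+1)).splitOnP (· == '%') = q :: qs from hq]
        rfl
      rw [hsplit]
      simp only [List.headD, List.tail]
      simp only [hc, if_false]
      have htk : cs.take i ++ cs.getD i ' ' :: q = cs.take (i + 1) ++ q := by
        rw [List.getD_eq_getElem cs ' ' h, ← List.take_concat_get' cs i h,
            List.append_assoc, List.singleton_append]
      rw [htk]
      have := main_eq line cs (i + 1) hcs
      rw [this]
      have : (cs.drop (i + 1)).splitOn '%' = q :: qs := hq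
      rw [this]
      simp [List.headD, List.tail]
  · have hdrop : cs.drop i = [] := List.drop_eq_nil_of_le (Nat.le_of_not_lt h)
    have htake : cs.take i = cs := List.take_of_length_le (Nat.le_of_not_lt h)
    rw [removeGoA]
    simp only [h, if_false, hdrop, htake]
    simp only [List.splitOn, List.splitOnP_nil, List.headD, List.tail, List.append_nil]
    simp only [goB]
    rw [hcs, mk_strip_toList]
termination_by cs.length - i

-- ===== VERDICT (by name: the statement is the Claim_ definition above) =====
theorem remove_line_comments_spec : Claim_equal_remove_line_comments := by
  intro line _
  unfold Spec_remove_line_comments remove_line_comments remove_line_comments_alt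
  simpa using main_eq line line.toList 0 rfl
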